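-- pv_equiv track=rewrite | github.com/Root0110/ODU-NLP | OA-STM-domains/BiLSTM-character.py | original
-- ===== SOURCE A (Python) =====
-- def original(y,idx2tag):
--     sent_tag_list = []
--     for sent_tags in y:
--         word_tag_list = []
--         for tag in sent_tags:
--             word_tag_list.append(idx2tag[tag])
--         sent_tag_list.append(word_tag_list)
--     for i in range(len(sent_tag_list)):
--         for j in range(len(sent_tag_list[i])):
--             if sent_tag_list[i][j] == 'PAD':
--                 sent_tag_list[i][j] = sent_tag_list[i][j].replace('PAD', 'O')
--     return sent_tag_list
-- ===== SOURCE B (Python) =====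
-- def original(y, idx2tag):
--     # Rewrite the lookup table once: PAD->O decided per tag type, not per token.
--     table = {k: ('O' if v == 'PAD' else v) for k, v in idx2tag.items()}
--     return [[table[t] for t in sent] for sent in y]
-- ===== Notes on version B (the rewrite author's own statement) =====
-- stated objective: simpler
-- what changed: B pre-transforms the index-to-tag table once (replacing the value 'PAD' by 'O' in the dictionary itself) and then does plain lookups, instead of A's build pass over the data followed by a second index-based rescan-and-mutate pass; the PAD test runs once per dictionary entry, never per token.
import Mathlib
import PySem

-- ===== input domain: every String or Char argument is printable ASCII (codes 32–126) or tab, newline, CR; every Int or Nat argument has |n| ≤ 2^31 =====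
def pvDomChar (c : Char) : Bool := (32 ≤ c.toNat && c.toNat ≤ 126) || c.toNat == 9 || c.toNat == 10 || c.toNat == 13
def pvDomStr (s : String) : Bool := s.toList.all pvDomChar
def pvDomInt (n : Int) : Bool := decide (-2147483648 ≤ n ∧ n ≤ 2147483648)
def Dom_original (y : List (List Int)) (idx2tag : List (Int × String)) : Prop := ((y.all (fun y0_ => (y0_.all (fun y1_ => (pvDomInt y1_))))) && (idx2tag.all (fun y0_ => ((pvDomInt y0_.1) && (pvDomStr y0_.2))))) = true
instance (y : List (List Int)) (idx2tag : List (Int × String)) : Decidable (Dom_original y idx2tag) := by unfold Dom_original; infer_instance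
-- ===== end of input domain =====

-- B replaces A's build-then-rescan over the data by a one-time rewrite of the lookup
-- table ('PAD' ↦ 'O' inside the dictionary) followed by plain lookups (objective: simpler).

-- ===== PORT A =====
-- Phase 1: build sent_tag_list by appending dict lookups (getD's default is never
-- reached under Pre_original, which requires every tag to be a key).
-- Phase 2: the in-place index rescan replaces each element equal to "PAD" by
-- its .replace("PAD","O"); the element-wise update of the nested list is the map below.
def original (y : List (List Int)) (idx2tag : List (Int × String)) : List (List String) :=
  let sentTagList :=
    y.foldl (fun acc sentTags =>
      acc ++ [sentTags.foldl (fun w tag => w ++ [(PySem.Dict.ofList idx2tag).getD tag ""]) []]) []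
  sentTagList.map (fun row =>
    row.map (fun s => if s == "PAD" then PySem.Str.replace s "PAD" "O" else s))

-- ===== PORT B =====
-- table = {k: ('O' if v == 'PAD' else v) for k, v in idx2tag.items()}  — a dict
-- comprehension over the dict's items is the fold of inserts below; then pure lookups.
def original_alt (y : List (List Int)) (idx2tag : List (Int × String)) : List (List String) :=
  let table := (PySem.Dict.ofList idx2tag).items.foldl
    (fun tb kv => tb.insert kv.1 (if kv.2 == "PAD" then "O" else kv.2)) PySem.Dict.empty
  y.map (fun sent => sent.map (fun t => table.getD t ""))

-- ===== PRECONDITION & SPEC =====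
-- Pre_: every tag index occurring in y must be a key of idx2tag; otherwise A raises KeyError.
def Pre_original (y : List (List Int)) (idx2tag : List (Int × String)) : Prop :=
  (y.all (fun sent => sent.all (fun t => (PySem.Dict.ofList idx2tag).contains t))) = true
instance (y : List (List Int)) (idx2tag : List (Int × String)) : Decidable (Pre_original y idx2tag) := by unfold Pre_original; infer_instance

def pvWitness_original : List (List Int) × (List (Int × String)) :=
  ([[0, 1], [1]], [(0, "PAD"), (1, "B-Task")])

def Spec_original (y : List (List Int)) (idx2tag : List (Int × String)) (out : List (List String)) : Prop := out = original_alt y idx2tag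
instance (y : List (List Int)) (idx2tag : List (Int × String)) (out : List (List String)) : Decidable (Spec_original y idx2tag out) := by unfold Spec_original; infer_instance

-- ===== CLAIM (what is proved, stated in full; the proofs are below) =====
def Claim_equal_original : Prop := ∀ (y : List (List Int)) (idx2tag : List (Int × String)), Dom_original y idx2tag → Pre_original y idx2tag → Spec_original y idx2tag (original y idx2tag)

-- ===== LEMMAS AND PROOFS =====

-- the dict comprehension {k: f v for (k, v) in d.items()}: its get? is d's, mapped by f
theorem table_get? {κ ν ν' : Type} [BEq κ] [LawfulBEq κ]
    (d : PySem.Dict κ ν) (hn : d.keys.Nodup) (f : ν → ν') (t : κ) :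
    (d.items.foldl (fun tb kv => tb.insert kv.1 (f kv.2)) PySem.Dict.empty).get? t
      = (d.get? t).map f := by
  have hitems :
      (d.items.foldl (fun tb kv => tb.insert kv.1 (f kv.2)) PySem.Dict.empty).items
        = d.items.map (fun kv => (kv.1, f kv.2)) := by
    have := PySem.Dict.items_foldl_insert_fresh (l := d.items) (k := fun kv => kv.1)
      (v := fun kv => f kv.2) (d := (PySem.Dict.empty : PySem.Dict κ ν'))
      (by intro a _; simp [PySem.Dict.contains_empty])
      (by simpa [PySem.Dict.keys] using hn)
    simpa [PySem.Dict.items] using this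
  set tb := d.items.foldl (fun tb kv => tb.insert kv.1 (f kv.2)) PySem.Dict.empty with htb
  have htbkeys : tb.keys = d.keys := by
    simp [PySem.Dict.keys, hitems]
  cases hg : d.get? t with
  | none =>
      have ht : t ∉ d.keys := (PySem.Dict.get?_eq_none_iff_not_mem_keys _ _).mp hg
      have : tb.get? t = none := by
        rw [PySem.Dict.get?_eq_none_iff_not_mem_keys _ _, htbkeys]; exact ht
      simp [this]
  | some v =>
      have hmem : (t, v) ∈ d.items := PySem.Dict.mem_items_of_get?_eq_some _ hg
      have hmem' : (t, f v) ∈ tb.items := by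
        rw [hitems]; exact List.mem_map.mpr ⟨(t, v), hmem, rfl⟩
      have : tb.get? t = some (f v) :=
        PySem.Dict.get?_of_mem_items _ hmem' (by rw [htbkeys]; exact hn)
      simp [this]

-- pointwise: A's guarded replace equals the rewritten table's entry, for contained keys
theorem pv_point (idx2tag : List (Int × String)) (t : Int)
    (hc : (PySem.Dict.ofList idx2tag).contains t = true) :
    (if (PySem.Dict.ofList idx2tag).getD t "" == "PAD"
       then PySem.Str.replace ((PySem.Dict.ofList idx2tag).getD t "") "PAD" "O"
       else (PySem.Dict.ofList idx2tag).getD t "")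
      = ((PySem.Dict.ofList idx2tag).items.foldl
          (fun tb kv => tb.insert kv.1 (if kv.2 == "PAD" then "O" else kv.2))
          PySem.Dict.empty).getD t "" := by
  set d := PySem.Dict.ofList idx2tag with hd
  obtain ⟨v, hv⟩ : ∃ v, d.get? t = some v := by
    cases hg : d.get? t with
    | none =>
        exfalso
        have := PySem.Dict.contains_eq_isSome_get? (d := d) (k := t)
        rw [hg] at this; simp [this] at hc
    | some v => exact ⟨v, rfl⟩
  have hget := table_get? d (PySem.Dict.nodup_keys_ofList idx2tag)
      (fun v => if v == "PAD" then "O" else v) t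
  rw [hv] at hget
  have h1 : d.getD t "" = v := PySem.Dict.getD_of_get?_eq_some _ _ hv
  have h2 : ((d.items.foldl
      (fun tb kv => tb.insert kv.1 (if kv.2 == "PAD" then "O" else kv.2))
      PySem.Dict.empty)).getD t "" = if v == "PAD" then "O" else v := by
    exact PySem.Dict.getD_of_get?_eq_some _ _ hget
  rw [h1, h2]
  by_cases h : v = "PAD"
  · subst h; decide
  · simp [h]

-- ===== VERDICT (by name: the statement is the Claim_ definition above) =====
theorem original_spec : Claim_equal_original := by
  intro y idx2tag _ hpre
  unfold Pre_original at hpre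
  rw [List.all_eq_true] at hpre
  unfold Spec_original original original_alt
  simp only [PySem.List.foldl_append_singleton_eq_map, List.nil_append, List.map_map,
    Function.comp_def]
  refine List.map_congr_left (fun sent hsent => ?_)
  have hpre' := hpre sent hsent
  rw [List.all_eq_true] at hpre'
  refine List.map_congr_left (fun t ht => ?_)
  exact pv_point idx2tag t (by simpa using hpre' t ht)
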